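-- pv_equiv track=rewrite | github.com/y-ann/aoc2023 | day3/part2.py | numbers_matching_symbols
-- ===== SOURCE A (Python) =====
-- def numbers_matching_symbols(numb, symb) -> dict[int, list[int]]:
--     result = {}
--     for n in numb:
--         for symb_index, s in enumerate(symb):
--             row_numb = n[1]
--             start_numb = n[2]
--             end_numb = n[3] - 1
--             i_symb, j_symb = s
--             if abs(i_symb - row_numb) <= 1 and (
--                 (start_numb - j_symb) <= 1 and (j_symb - end_numb) <= 1
--             ):
--                 if symb_index in result.keys():
--                     result[symb_index].append(n[0])
--                 else:
--                     result[symb_index] = [n[0]]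
--     return result
-- ===== SOURCE B (Python) =====
-- def numbers_matching_symbols(numb, symb) -> dict[int, list[int]]:
--     # Bucket the symbols by row once, then each number only probes its three
--     # adjacent row buckets instead of rescanning every symbol.
--     by_row = {}
--     for idx, s in enumerate(symb):
--         by_row.setdefault(s[0], []).append((idx, s[1]))
--     result = {}
--     for n in numb:
--         val, row, start, end = n[0], n[1], n[2], n[3]
--         hits = []
--         for r in (row - 1, row, row + 1):
--             for idx, j in by_row.get(r, []):
--                 if start - 1 <= j <= end:
--                     hits.append(idx)
--         hits.sort()
--         for idx in hits:
--             result.setdefault(idx, []).append(val)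
--     return result
-- ===== Notes on version B (the rewrite author's own statement) =====
-- stated objective: faster
-- what changed: B buckets the symbols by row into a dict in one pass, then each number probes only its three adjacent row buckets (sorting the matched indices to preserve A's dict insertion order) instead of rescanning the whole symbol list per number.
import Mathlib
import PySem

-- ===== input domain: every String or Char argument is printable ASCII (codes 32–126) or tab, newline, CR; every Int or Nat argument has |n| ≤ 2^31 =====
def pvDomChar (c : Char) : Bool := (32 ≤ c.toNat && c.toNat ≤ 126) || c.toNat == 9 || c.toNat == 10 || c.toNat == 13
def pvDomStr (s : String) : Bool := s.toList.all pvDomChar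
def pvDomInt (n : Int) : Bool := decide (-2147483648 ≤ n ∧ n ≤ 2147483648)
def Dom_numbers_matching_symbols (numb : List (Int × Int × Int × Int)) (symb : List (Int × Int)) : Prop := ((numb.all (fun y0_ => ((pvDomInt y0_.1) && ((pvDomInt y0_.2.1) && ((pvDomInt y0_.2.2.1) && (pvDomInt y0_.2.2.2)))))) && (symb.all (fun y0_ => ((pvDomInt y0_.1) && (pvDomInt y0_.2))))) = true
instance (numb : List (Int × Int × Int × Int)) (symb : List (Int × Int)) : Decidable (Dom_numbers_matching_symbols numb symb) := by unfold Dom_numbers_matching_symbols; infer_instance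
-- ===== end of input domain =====

-- B buckets the symbols by row in one dict pass, so each number probes only its three adjacent
-- row buckets (sorting the matched indices to keep dict insertion order) instead of rescanning
-- every symbol; same return value, asymptotically fewer symbol visits when rows are spread out.

-- ===== PORT A =====
def numbers_matching_symbols (numb : List (Int × Int × Int × Int)) (symb : List (Int × Int)) : List (Int × List Int) :=
  (numb.foldl (fun result n =>
      (PySem.List.enumerate symb).foldl (fun result p =>
          let symb_index := p.1
          let row_numb := n.2.1
          let start_numb := n.2.2.1
          let end_numb := n.2.2.2 - 1
          let i_symb := p.2.1
          let j_symb := p.2.2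
          if |i_symb - row_numb| ≤ 1 ∧ start_numb - j_symb ≤ 1 ∧ j_symb - end_numb ≤ 1 then
            if result.contains symb_index then
              result.modify symb_index [] (fun l => l ++ [n.1])
            else
              result.insert symb_index [n.1]
          else result) result)
    (PySem.Dict.empty : PySem.Dict Int (List Int))).items

-- ===== PORT B =====
def numbers_matching_symbols_alt (numb : List (Int × Int × Int × Int)) (symb : List (Int × Int)) : List (Int × List Int) :=
  let by_row : PySem.Dict Int (List (Int × Int)) :=
    (PySem.List.enumerate symb).foldl
      (fun d p => d.modify p.2.1 [] (fun l => l ++ [(p.1, p.2.2)])) PySem.Dict.empty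
  (numb.foldl (fun result n =>
      let row := n.2.1
      let hits :=
        [row - 1, row, row + 1].foldl (fun hits r =>
          (by_row.getD r []).foldl (fun hits q =>
            if n.2.2.1 - 1 ≤ q.2 ∧ q.2 ≤ n.2.2.2 then hits ++ [q.1] else hits) hits) []
      let hits := PySem.List.sorted hits (fun x => x)
      hits.foldl (fun result idx => result.modify idx [] (fun l => l ++ [n.1])) result)
    (PySem.Dict.empty : PySem.Dict Int (List Int))).items

-- ===== PRECONDITION & SPEC =====
def Spec_numbers_matching_symbols (numb : List (Int × Int × Int × Int)) (symb : List (Int × Int)) (out : List (Int × List Int)) : Prop := out = numbers_matching_symbols_alt numb symb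
instance (numb : List (Int × Int × Int × Int)) (symb : List (Int × Int)) (out : List (Int × List Int)) : Decidable (Spec_numbers_matching_symbols numb symb out) := by unfold Spec_numbers_matching_symbols; infer_instance

-- ===== CLAIM (what is proved, stated in full; the proofs are below) =====
def Claim_equal_numbers_matching_symbols : Prop := ∀ (numb : List (Int × Int × Int × Int)) (symb : List (Int × Int)), Dom_numbers_matching_symbols numb symb → Spec_numbers_matching_symbols numb symb (numbers_matching_symbols numb symb)

-- ===== LEMMAS AND PROOFS =====

-- A's adjacency condition on an enumerated symbol p = (index, (i, j)), for the number n.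
def pvCondA (n : Int × Int × Int × Int) (p : Int × Int × Int) : Bool :=
  decide (|p.2.1 - n.2.1| ≤ 1 ∧ n.2.2.1 - p.2.2 ≤ 1 ∧ p.2.2 - (n.2.2.2 - 1) ≤ 1)

-- The matched symbol indices, in enumeration (= strictly increasing) order.
def pvMatched (symb : List (Int × Int)) (n : Int × Int × Int × Int) : List Int :=
  ((PySem.List.enumerate symb).filter (pvCondA n)).map (fun p => p.1)

-- The common per-match dict update.
def pvUpd (v : Int) (result : PySem.Dict Int (List Int)) (idx : Int) : PySem.Dict Int (List Int) :=
  result.modify idx [] (fun l => l ++ [v])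

-- A's append-or-insert branch is exactly pvUpd.
theorem pvUpdA_eq (result : PySem.Dict Int (List Int)) (idx v : Int) :
    (if result.contains idx then result.modify idx [] (fun l => l ++ [v])
     else result.insert idx [v]) = pvUpd v result idx := by
  unfold pvUpd
  by_cases h : result.contains idx = true
  · simp [h]
  · simp [eq_false_of_ne_true h, PySem.Dict.modify,
      PySem.Dict.getD_of_not_contains result ([] : List Int) (eq_false_of_ne_true h)]

-- A's inner loop collapses to a fold of pvUpd over the matched indices.
theorem foldl_if_upd (v : Int) (n : Int × Int × Int × Int) (l : List (Int × Int × Int))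
    (r : PySem.Dict Int (List Int)) :
    l.foldl (fun r p =>
        if |p.2.1 - n.2.1| ≤ 1 ∧ n.2.2.1 - p.2.2 ≤ 1 ∧ p.2.2 - (n.2.2.2 - 1) ≤ 1 then
          pvUpd v r p.1 else r) r
      = ((l.filter (pvCondA n)).map (fun p => p.1)).foldl (pvUpd v) r := by
  induction l generalizing r with
  | nil => rfl
  | cons x xs ih =>
      by_cases h : |x.2.1 - n.2.1| ≤ 1 ∧ n.2.2.1 - x.2.2 ≤ 1 ∧ x.2.2 - (n.2.2.2 - 1) ≤ 1
      · rw [List.foldl_cons, if_pos h,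
          List.filter_cons_of_pos (show pvCondA n x = true from decide_eq_true h),
          List.map_cons, List.foldl_cons]
        exact ih _
      · rw [List.foldl_cons, if_neg h,
          List.filter_cons_of_neg (by simpa [pvCondA] using h)]
        exact ih r

-- B's bucket-probe loop appends exactly the filtered first components.
theorem foldl_if_append (a b : Int) (l : List (Int × Int)) (acc : List Int) :
    l.foldl (fun acc q => if a ≤ q.2 ∧ q.2 ≤ b then acc ++ [q.1] else acc) acc
      = acc ++ ((l.filter (fun q => decide (a ≤ q.2 ∧ q.2 ≤ b))).map (fun q => q.1)) := by
  induction l generalizing acc with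
  | nil => simp
  | cons x xs ih =>
      by_cases h : a ≤ x.2 ∧ x.2 ≤ b
      · rw [List.foldl_cons, if_pos h, ih]
        simp [h]
      · rw [List.foldl_cons, if_neg h, ih]
        simp [h]

-- Filters by disjoint conditions concatenate to the filter of the disjunction.
theorem filter_append_perm_or {A : Type} (p q : A → Bool)
    (hpq : ∀ x, ¬(p x = true ∧ q x = true)) (l : List A) :
    (l.filter p ++ l.filter q).Perm (l.filter (fun x => p x || q x)) := by
  induction l with
  | nil => simp
  | cons x xs ih =>
      by_cases hp : p x = true
      · have hq' : q x = false := by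
          rcases Bool.eq_false_or_eq_true (q x) with h | h
          · exact absurd ⟨hp, h⟩ (hpq x)
          · exact h
        rw [List.filter_cons_of_pos hp, List.filter_cons_of_neg (p := q) (by simp [hq']),
          List.filter_cons_of_pos (p := fun x => p x || q x) (by simp [hp]),
          List.cons_append]
        exact ih.cons x
      · have hp' : p x = false := eq_false_of_ne_true hp
        by_cases hq : q x = true
        · rw [List.filter_cons_of_neg (p := p) (by simp [hp']), List.filter_cons_of_pos hq,
            List.filter_cons_of_pos (p := fun x => p x || q x) (by simp [hq])]
          exact List.perm_middle.trans (ih.cons x)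
        · have hq' : q x = false := eq_false_of_ne_true hq
          rw [List.filter_cons_of_neg (p := p) (by simp [hp']),
            List.filter_cons_of_neg (p := q) (by simp [hq']),
            List.filter_cons_of_neg (p := fun x => p x || q x) (by simp [hp', hq'])]
          exact ih

-- The row bucket built by B's first pass, read back.
theorem byRow_getD (symb : List (Int × Int)) (r : Int) :
    ((PySem.List.enumerate symb).foldl
        (fun d p => d.modify p.2.1 [] (fun l => l ++ [(p.1, p.2.2)]))
        (PySem.Dict.empty : PySem.Dict Int (List (Int × Int)))).getD r []
      = ((PySem.List.enumerate symb).filter (fun p => p.2.1 == r)).map (fun p => (p.1, p.2.2)) := by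
  have h := PySem.Dict.getD_foldl_modify_append
    ((PySem.List.enumerate symb).map (fun p => (p.2.1, (p.1, p.2.2))))
    (PySem.Dict.empty : PySem.Dict Int (List (Int × Int))) r
  rw [List.foldl_map] at h
  simpa [List.filter_map, Function.comp] using h

-- One bucket's contribution: the matched indices among symbols in row r.
theorem bucket_contrib (symb : List (Int × Int)) (n : Int × Int × Int × Int) (r : Int)
    (acc : List Int) :
    (((PySem.List.enumerate symb).filter (fun p => p.2.1 == r)).map
        (fun p => (p.1, p.2.2))).foldl
      (fun acc q => if n.2.2.1 - 1 ≤ q.2 ∧ q.2 ≤ n.2.2.2 then acc ++ [q.1] else acc) acc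
      = acc ++ ((PySem.List.enumerate symb).filter
          (fun p => p.2.1 == r && decide (n.2.2.1 - 1 ≤ p.2.2 ∧ p.2.2 ≤ n.2.2.2))).map
          (fun p => p.1) := by
  rw [foldl_if_append, List.filter_map, List.map_map]
  simp [Function.comp, List.filter_filter, Bool.and_comm]

-- The three buckets together are a permutation of the matched indices.
theorem hits_perm (symb : List (Int × Int)) (n : Int × Int × Int × Int) :
    (((PySem.List.enumerate symb).filter
          (fun p => p.2.1 == n.2.1 - 1 && decide (n.2.2.1 - 1 ≤ p.2.2 ∧ p.2.2 ≤ n.2.2.2))).map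
          (fun p => p.1)
      ++ ((PySem.List.enumerate symb).filter
          (fun p => p.2.1 == n.2.1 && decide (n.2.2.1 - 1 ≤ p.2.2 ∧ p.2.2 ≤ n.2.2.2))).map
          (fun p => p.1)
      ++ ((PySem.List.enumerate symb).filter
          (fun p => p.2.1 == n.2.1 + 1 && decide (n.2.2.1 - 1 ≤ p.2.2 ∧ p.2.2 ≤ n.2.2.2))).map
          (fun p => p.1)).Perm (pvMatched symb n) := by
  unfold pvMatched
  have h12 := filter_append_perm_or
    (fun p : Int × Int × Int => p.2.1 == n.2.1 - 1 && decide (n.2.2.1 - 1 ≤ p.2.2 ∧ p.2.2 ≤ n.2.2.2))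
    (fun p => p.2.1 == n.2.1 && decide (n.2.2.1 - 1 ≤ p.2.2 ∧ p.2.2 ≤ n.2.2.2))
    (by
      intro x hx
      rcases hx with ⟨h1, h2⟩
      simp only [Bool.and_eq_true, beq_iff_eq] at h1 h2
      omega)
    (PySem.List.enumerate symb)
  have h123 := filter_append_perm_or
    (fun p : Int × Int × Int =>
      (p.2.1 == n.2.1 - 1 && decide (n.2.2.1 - 1 ≤ p.2.2 ∧ p.2.2 ≤ n.2.2.2))
        || (p.2.1 == n.2.1 && decide (n.2.2.1 - 1 ≤ p.2.2 ∧ p.2.2 ≤ n.2.2.2)))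
    (fun p => p.2.1 == n.2.1 + 1 && decide (n.2.2.1 - 1 ≤ p.2.2 ∧ p.2.2 ≤ n.2.2.2))
    (by
      intro x hx
      rcases hx with ⟨h1, h2⟩
      simp only [Bool.or_eq_true, Bool.and_eq_true, beq_iff_eq] at h1 h2
      omega)
    (PySem.List.enumerate symb)
  have hperm := ((h12.append_right _).trans h123).map (fun p : Int × Int × Int => p.1)
  rw [List.map_append, List.map_append] at hperm
  refine hperm.trans (List.Perm.of_eq ?_)
  congr 1
  apply List.filter_congr
  intro p _
  rw [Bool.eq_iff_iff]
  simp only [Bool.or_eq_true, Bool.and_eq_true, beq_iff_eq, decide_eq_true_iff, pvCondA, abs_le]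
  omega

-- The matched indices are strictly increasing (so sorting B's hits yields exactly them).
theorem pvMatched_pairwise (symb : List (Int × Int)) (n : Int × Int × Int × Int) :
    (pvMatched symb n).Pairwise (· < ·) := by
  unfold pvMatched
  exact List.pairwise_map.mpr
    (List.Pairwise.sublist List.filter_sublist (PySem.List.pairwise_lt_enumerate symb 0))

-- ===== VERDICT (by name: the statement is the Claim_ definition above) =====
theorem numbers_matching_symbols_spec : Claim_equal_numbers_matching_symbols := by
  intro numb symb _
  unfold Spec_numbers_matching_symbols numbers_matching_symbols numbers_matching_symbols_alt
  congr 1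
  apply PySem.List.foldl_congr_mem
  intro result n _
  -- A's step
  rw [PySem.List.foldl_congr_mem (PySem.List.enumerate symb) _
      (fun r (p : Int × Int × Int) =>
        if |p.2.1 - n.2.1| ≤ 1 ∧ n.2.2.1 - p.2.2 ≤ 1 ∧ p.2.2 - (n.2.2.2 - 1) ≤ 1 then
          pvUpd n.1 r p.1 else r) result
      (fun r p _ => by
        dsimp only
        by_cases h : |p.2.1 - n.2.1| ≤ 1 ∧ n.2.2.1 - p.2.2 ≤ 1 ∧ p.2.2 - (n.2.2.2 - 1) ≤ 1
        · rw [if_pos h, if_pos h]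
          exact pvUpdA_eq r p.1 n.1
        · rw [if_neg h, if_neg h])]
  rw [foldl_if_upd]
  -- B's step
  simp only [List.foldl_cons, List.foldl_nil, byRow_getD, bucket_contrib, List.nil_append,
    List.append_assoc]
  rw [PySem.List.sorted_eq_of_perm_of_pairwise_lt _ (pvMatched symb n) (fun x => x)
      (by simpa using (hits_perm symb n).symm) (pvMatched_pairwise symb n)]
  rfl
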